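-- pv_equiv track=rewrite | github.com/bbeltrame01/Ghostbusters | main.py | radar
-- ===== SOURCE A (Python) =====
-- def radar(jogador_pos, fantasmas, raio):
--   x, y = jogador_pos
--   visiveis = []
--   for dx in range(-raio, raio + 1):
--     for dy in range(-raio, raio + 1):
--       if (x + dx, y + dy) in fantasmas:
--         visiveis.append((x + dx, y + dy))
--   return visiveis
-- ===== SOURCE B (Python) =====
-- def radar(jogador_pos, fantasmas, raio):
--     x, y = jogador_pos
--     return sorted({(fx, fy) for (fx, fy) in fantasmas
--                    if abs(fx - x) <= raio and abs(fy - y) <= raio})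
-- ===== Notes on version B (the rewrite author's own statement) =====
-- stated objective: faster
-- what changed: Instead of scanning every cell of the (2*raio+1)^2 square and testing list membership per cell, B filters the ghost list once by Chebyshev distance, deduplicates with a set, and sorts the survivors lexicographically.
import Mathlib
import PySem

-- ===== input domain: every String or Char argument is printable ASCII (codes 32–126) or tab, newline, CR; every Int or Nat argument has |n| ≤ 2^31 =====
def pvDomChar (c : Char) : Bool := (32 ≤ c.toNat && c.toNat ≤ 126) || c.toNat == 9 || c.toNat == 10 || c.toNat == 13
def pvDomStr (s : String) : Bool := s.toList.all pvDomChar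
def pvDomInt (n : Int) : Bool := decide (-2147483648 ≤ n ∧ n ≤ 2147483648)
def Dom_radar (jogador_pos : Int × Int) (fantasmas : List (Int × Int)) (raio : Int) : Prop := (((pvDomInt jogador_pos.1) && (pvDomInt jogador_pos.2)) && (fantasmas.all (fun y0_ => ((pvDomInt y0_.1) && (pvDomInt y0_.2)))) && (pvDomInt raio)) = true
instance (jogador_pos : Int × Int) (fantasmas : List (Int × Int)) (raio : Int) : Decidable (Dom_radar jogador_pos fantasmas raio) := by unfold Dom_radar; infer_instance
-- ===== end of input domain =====

-- B replaces A's O(raio^2 * F) scan of every square cell (with a list-membership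
-- test per cell) by one filter of the ghost list by Chebyshev distance, set
-- deduplication, and a lexicographic sort (O(F log F)).

-- ===== PORT A =====
def radar (jogador_pos : Int × Int) (fantasmas : List (Int × Int)) (raio : Int) : List (Int × Int) :=
  (PySem.List.pyRange (-raio) (raio + 1)).foldl (fun visiveis dx =>
    (PySem.List.pyRange (-raio) (raio + 1)).foldl (fun visiveis dy =>
      if (jogador_pos.1 + dx, jogador_pos.2 + dy) ∈ fantasmas then
        visiveis ++ [(jogador_pos.1 + dx, jogador_pos.2 + dy)]
      else visiveis) visiveis) []

-- ===== PORT B =====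
def radar_alt (jogador_pos : Int × Int) (fantasmas : List (Int × Int)) (raio : Int) : List (Int × Int) :=
  PySem.List.sorted2
    (PySem.Set.ofList (fantasmas.filter (fun q =>
      decide (|q.1 - jogador_pos.1| ≤ raio ∧ |q.2 - jogador_pos.2| ≤ raio))))
    (fun q => q.1) (fun q => q.2)

-- ===== PRECONDITION & SPEC =====
def Spec_radar (jogador_pos : Int × Int) (fantasmas : List (Int × Int)) (raio : Int) (out : List (Int × Int)) : Prop := out = radar_alt jogador_pos fantasmas raio
instance (jogador_pos : Int × Int) (fantasmas : List (Int × Int)) (raio : Int) (out : List (Int × Int)) : Decidable (Spec_radar jogador_pos fantasmas raio out) := by unfold Spec_radar; infer_instance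

-- ===== CLAIM (what is proved, stated in full; the proofs are below) =====
def Claim_equal_radar : Prop := ∀ (jogador_pos : Int × Int) (fantasmas : List (Int × Int)) (raio : Int), Dom_radar jogador_pos fantasmas raio → Spec_radar jogador_pos fantasmas raio (radar jogador_pos fantasmas raio)

-- ===== LEMMAS AND PROOFS =====

-- strict lexicographic order on pairs of integers (the order of Python's tuple sort)
def LexLt (a b : Int × Int) : Prop := a.1 < b.1 ∨ (a.1 = b.1 ∧ a.2 < b.2)

-- the Bool comparator sorted2 uses for the key pair (fst, snd)
def cmpLex (a b : Int × Int) : Bool :=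
  decide (a.1 < b.1) || (!decide (b.1 < a.1) && decide (a.2 < b.2))

lemma cmpLex_true_iff (a b : Int × Int) : cmpLex a b = true ↔ LexLt a b := by
  simp only [cmpLex, LexLt, Bool.or_eq_true, Bool.and_eq_true, Bool.not_eq_true',
    decide_eq_true_eq, decide_eq_false_iff_not]
  omega

lemma lexLt_asymm {a b : Int × Int} (h1 : LexLt a b) (h2 : LexLt b a) : False := by
  simp only [LexLt] at h1 h2; omega

lemma lexLt_trans {a b c : Int × Int} (h1 : LexLt a b) (h2 : LexLt b c) : LexLt a c := by
  simp only [LexLt] at *; omega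

lemma lexLt_of_not_of_ne {a b : Int × Int} (h1 : ¬ LexLt b a) (h2 : a ≠ b) : LexLt a b := by
  rcases a with ⟨a1, a2⟩; rcases b with ⟨b1, b2⟩
  simp only [LexLt] at h1 ⊢
  have h2' : ¬ (a1 = b1 ∧ a2 = b2) := fun ⟨e1, e2⟩ => h2 (by simp [e1, e2])
  omega

-- insertion by cmpLex preserves "pairwise not-greater" (lexicographic sortedness)
lemma insertBy_cmpLex_pairwise (x : Int × Int) (ys : List (Int × Int))
    (h : ys.Pairwise (fun a b => ¬ LexLt b a)) :
    (PySem.List.insertBy cmpLex x ys).Pairwise (fun a b => ¬ LexLt b a) := by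
  induction ys with
  | nil => simp [PySem.List.insertBy]
  | cons y ys ih =>
    rw [List.pairwise_cons] at h
    rw [PySem.List.insertBy]
    by_cases hxy : cmpLex x y = true
    · rw [if_pos hxy]
      have hlt : LexLt x y := (cmpLex_true_iff _ _).mp hxy
      refine List.Pairwise.cons ?_ (List.Pairwise.cons h.1 h.2)
      intro z hz hzx
      rcases List.mem_cons.mp hz with rfl | hz'
      · exact lexLt_asymm hlt hzx
      · exact h.1 z hz' (lexLt_trans hzx hlt)
    · rw [if_neg hxy]
      refine List.Pairwise.cons ?_ (ih h.2)
      intro z hz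
      rcases (PySem.List.insertBy_mem_iff _ _ _ _).mp hz with rfl | hz'
      · intro hc; exact hxy ((cmpLex_true_iff _ _).mpr hc)
      · exact h.1 z hz'

lemma foldl_insertBy_cmpLex_pairwise (xs acc : List (Int × Int))
    (h : acc.Pairwise (fun a b => ¬ LexLt b a)) :
    (xs.foldl (fun acc x => PySem.List.insertBy cmpLex x acc) acc).Pairwise
      (fun a b => ¬ LexLt b a) := by
  induction xs generalizing acc with
  | nil => exact h
  | cons x xs ih => exact ih _ (insertBy_cmpLex_pairwise x acc h)

-- the inner Python loop: conditional appends are filter-then-map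
lemma inner_loop_eq (P : Int → Prop) [DecidablePred P] (g : Int → Int × Int)
    (l : List Int) (acc : List (Int × Int)) :
    l.foldl (fun acc dy => if P dy then acc ++ [g dy] else acc) acc
      = acc ++ (l.filter (fun dy => decide (P dy))).map g := by
  induction l generalizing acc with
  | nil => simp
  | cons d l ih =>
    by_cases h : P d <;>
      simp [List.foldl_cons, h, ih, List.append_assoc]

-- the outer Python loop: repeated extends are a flatMap
lemma outer_loop_eq (G : Int → List (Int × Int)) (l : List Int) (acc : List (Int × Int)) :
    l.foldl (fun acc dx => acc ++ G dx) acc = acc ++ l.flatMap G := by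
  induction l generalizing acc with
  | nil => simp
  | cons d l ih => simp [List.foldl_cons, ih, List.append_assoc]

-- A's result, as a flatMap over the dx range
lemma radar_eq_flatMap (jp : Int × Int) (f : List (Int × Int)) (raio : Int) :
    radar jp f raio
      = (PySem.List.pyRange (-raio) (raio + 1)).flatMap (fun dx =>
          ((PySem.List.pyRange (-raio) (raio + 1)).filter (fun dy =>
            decide ((jp.1 + dx, jp.2 + dy) ∈ f))).map (fun dy => (jp.1 + dx, jp.2 + dy))) := by
  unfold radar
  simp only [inner_loop_eq (fun dy => (jp.1 + _, jp.2 + dy) ∈ f) _]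
  rw [outer_loop_eq]
  simp

lemma mem_radar_iff (jp : Int × Int) (f : List (Int × Int)) (raio : Int) (q : Int × Int) :
    q ∈ radar jp f raio ↔ q ∈ f ∧ |q.1 - jp.1| ≤ raio ∧ |q.2 - jp.2| ≤ raio := by
  rw [radar_eq_flatMap]
  simp only [List.mem_flatMap, List.mem_map, List.mem_filter,
    PySem.List.mem_pyRange_one, decide_eq_true_eq]
  constructor
  · rintro ⟨dx, hdx, dy, ⟨hdy, hmem⟩, rfl⟩
    refine ⟨hmem, ?_, ?_⟩ <;> simp only [abs_le] <;> omega
  · rintro ⟨hmem, h1, h2⟩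
    rw [abs_le] at h1 h2
    refine ⟨q.1 - jp.1, by omega, q.2 - jp.2, ⟨by omega, ?_⟩, ?_⟩ <;>
      simp_all

lemma radar_pairwise (jp : Int × Int) (f : List (Int × Int)) (raio : Int) :
    (radar jp f raio).Pairwise LexLt := by
  rw [radar_eq_flatMap, List.pairwise_flatMap]
  constructor
  · intro dx _
    rw [List.pairwise_map]
    refine List.Pairwise.filter _ ?_
    exact (PySem.List.pairwise_lt_pyRange_one _ _).imp (fun h => Or.inr ⟨rfl, by omega⟩)
  · refine (PySem.List.pairwise_lt_pyRange_one _ _).imp ?_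
    intro dx dx' h x hx y hy
    rcases List.mem_map.mp hx with ⟨_, _, rfl⟩
    rcases List.mem_map.mp hy with ⟨_, _, rfl⟩
    exact Or.inl (by omega)

lemma radar_nodup (jp : Int × Int) (f : List (Int × Int)) (raio : Int) :
    (radar jp f raio).Nodup :=
  (radar_pairwise jp f raio).imp (fun h => by
    intro rfl_eq; subst rfl_eq; exact lexLt_asymm h h)

-- B's result: a permutation of the deduplicated filtered list, lexicographically sorted
lemma radar_alt_eq_foldl (jp : Int × Int) (f : List (Int × Int)) (raio : Int) :
    radar_alt jp f raio
      = (PySem.Set.ofList (f.filter (fun q =>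
          decide (|q.1 - jp.1| ≤ raio ∧ |q.2 - jp.2| ≤ raio)))).foldl
          (fun acc x => PySem.List.insertBy cmpLex x acc) [] := by
  rfl

lemma radar_alt_perm (jp : Int × Int) (f : List (Int × Int)) (raio : Int) :
    (radar_alt jp f raio).Perm
      (PySem.Set.ofList (f.filter (fun q =>
        decide (|q.1 - jp.1| ≤ raio ∧ |q.2 - jp.2| ≤ raio)))) := by
  rw [radar_alt_eq_foldl]
  simpa using PySem.List.foldl_insertBy_perm cmpLex _ []

lemma mem_radar_alt_iff (jp : Int × Int) (f : List (Int × Int)) (raio : Int) (q : Int × Int) :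
    q ∈ radar_alt jp f raio ↔ q ∈ f ∧ |q.1 - jp.1| ≤ raio ∧ |q.2 - jp.2| ≤ raio := by
  rw [(radar_alt_perm jp f raio).mem_iff, PySem.Set.mem_ofList, List.mem_filter]
  simp

lemma radar_alt_nodup (jp : Int × Int) (f : List (Int × Int)) (raio : Int) :
    (radar_alt jp f raio).Nodup :=
  (radar_alt_perm jp f raio).nodup_iff.mpr (PySem.Set.nodup_ofList _)

lemma radar_alt_pairwise (jp : Int × Int) (f : List (Int × Int)) (raio : Int) :
    (radar_alt jp f raio).Pairwise LexLt := by
  have hle : (radar_alt jp f raio).Pairwise (fun a b => ¬ LexLt b a) := by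
    rw [radar_alt_eq_foldl]
    exact foldl_insertBy_cmpLex_pairwise _ [] (by simp)
  have hnd : (radar_alt jp f raio).Pairwise (fun a b => a ≠ b) :=
    radar_alt_nodup jp f raio
  exact (hle.and hnd).imp (fun h => lexLt_of_not_of_ne h.1 h.2)

-- ===== VERDICT (by name: the statement is the Claim_ definition above) =====
theorem radar_spec : Claim_equal_radar := by
  intro jp f raio _
  show radar jp f raio = radar_alt jp f raio
  refine List.Perm.eq_of_pairwise (le := LexLt)
    (fun a b _ _ h1 h2 => absurd h1 (fun h => lexLt_asymm h h2))
    (radar_pairwise jp f raio) (radar_alt_pairwise jp f raio) ?_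
  rw [List.perm_ext_iff_of_nodup (radar_nodup jp f raio) (radar_alt_nodup jp f raio)]
  intro q
  rw [mem_radar_iff, mem_radar_alt_iff]
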